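-- pv_equiv track=rewrite | github.com/gabriellaec/desoft-analise-exercicios | backup/user_116/ch167_2020_06_10_17_32_06_203003.py | total_do_semestre_por_bairro
-- ===== SOURCE A (Python) =====
-- def total_do_semestre_por_bairro(dicio):
--     listav=[]
--     listab=[]
--     for l,m in dicio.items():
--         dicio[l]=sum(m[6:12])
--         listav.append((m[6:12]))
--         listab.append(l)
--     a=max(listav)
--     z=listav.index(a)
--
--
--     return listab[z]
-- ===== SOURCE B (Python) =====
-- def total_do_semestre_por_bairro(dicio):
--     best = None
--     for l, m in dicio.items():
--         s = m[6:12]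
--         dicio[l] = sum(s)
--         if best is None or best[1] < s:
--             best = (l, s)
--     if best is None:
--         raise ValueError("total_do_semestre_por_bairro() arg is an empty dict")
--     return best[0]
-- ===== Notes on version B (the rewrite author's own statement) =====
-- stated objective: simpler
-- what changed: B replaces A's two parallel lists plus a separate max() and .index() rescan by a single pass that keeps the current best (key, slice) pair while performing the same in-place mutation, so no intermediate lists are built and the list is traversed once.
import Mathlib
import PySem

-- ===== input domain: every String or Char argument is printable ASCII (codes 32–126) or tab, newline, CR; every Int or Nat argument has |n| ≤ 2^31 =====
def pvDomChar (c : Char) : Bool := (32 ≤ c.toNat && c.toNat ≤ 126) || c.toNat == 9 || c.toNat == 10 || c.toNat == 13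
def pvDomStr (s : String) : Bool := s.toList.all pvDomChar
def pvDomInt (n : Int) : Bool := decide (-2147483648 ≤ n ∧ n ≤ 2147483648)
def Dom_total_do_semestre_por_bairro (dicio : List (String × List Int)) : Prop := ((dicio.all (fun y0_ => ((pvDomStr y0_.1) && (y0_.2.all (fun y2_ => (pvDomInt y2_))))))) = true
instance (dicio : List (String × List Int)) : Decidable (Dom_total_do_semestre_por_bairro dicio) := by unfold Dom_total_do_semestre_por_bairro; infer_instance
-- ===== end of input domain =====

-- B is a single pass keeping the running best (key, slice) pair instead of A's two parallel
-- lists followed by max() and an .index() rescan; same objective, no speed claim.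
-- Both programs mutate dicio in place (dicio[l] = sum(m[6:12])) identically; the equivalence
-- proved here is about the RETURN value only (the mutated dict maps keys to ints, outside the
-- parameter's type).

-- ===== PORT A =====
def total_do_semestre_por_bairro (dicio : List (String × List Int)) : String :=
  -- listav/listab built by the loop's two appends; then a = max(listav), z = listav.index(a),
  -- return listab[z].  max([]) raises ValueError in Python: excluded by Pre_ (the none branches).
  let st := dicio.foldl
    (fun st p => (st.1 ++ [PySem.List.slice p.2 (some 6) (some 12)], st.2 ++ [p.1]))
    (([] : List (List Int)), ([] : List String))
  let listav := st.1
  let listab := st.2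
  match PySem.List.max? listav (fun x => x) with
  | none => ""
  | some a =>
    match PySem.List.index? listav a with
    | none => ""
    | some z => (PySem.List.pyGet? listab (z : Int)).getD ""

-- ===== PORT B =====
def total_do_semestre_por_bairro_alt (dicio : List (String × List Int)) : String :=
  let best := dicio.foldl
    (fun best p =>
      let s := PySem.List.slice p.2 (some 6) (some 12)
      match best with
      | none => some (p.1, s)
      | some b => if b.2 < s then some (p.1, s) else some b)
    (none : Option (String × List Int))
  match best with
  | none => ""   -- Python B raises ValueError here; excluded by Pre_
  | some b => b.1

-- ===== PRECONDITION & SPEC =====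
-- Pre_ excludes only the empty dict, on which both Pythons raise ValueError.
def Pre_total_do_semestre_por_bairro (dicio : List (String × List Int)) : Prop := dicio ≠ []
instance (dicio : List (String × List Int)) : Decidable (Pre_total_do_semestre_por_bairro dicio) := by unfold Pre_total_do_semestre_por_bairro; infer_instance

def pvWitness_total_do_semestre_por_bairro : (List (String × List Int)) :=
  [("centro", [1, 2, 3, 4, 5, 6, 7, 8]), ("lapa", [0, 0, 0, 0, 0, 0, 9])]

def Spec_total_do_semestre_por_bairro (dicio : List (String × List Int)) (out : String) : Prop := out = total_do_semestre_por_bairro_alt dicio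
instance (dicio : List (String × List Int)) (out : String) : Decidable (Spec_total_do_semestre_por_bairro dicio out) := by unfold Spec_total_do_semestre_por_bairro; infer_instance

-- ===== CLAIM (what is proved, stated in full; the proofs are below) =====
def Claim_equal_total_do_semestre_por_bairro : Prop := ∀ (dicio : List (String × List Int)), Dom_total_do_semestre_por_bairro dicio → Pre_total_do_semestre_por_bairro dicio → Spec_total_do_semestre_por_bairro dicio (total_do_semestre_por_bairro dicio)

-- ===== LEMMAS AND PROOFS =====

-- B's fold, abstracted over the precomputed (key, slice) pairs.
def pvBestFold (ps : List (String × List Int)) (acc : Option (String × List Int)) :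
    Option (String × List Int) :=
  ps.foldl
    (fun best q =>
      match best with
      | none => some q
      | some b => if b.2 < q.2 then some q else some b)
    acc

theorem pvBestFold_eq_alt (dicio : List (String × List Int))
    (acc : Option (String × List Int)) :
    dicio.foldl
      (fun best p =>
        let s := PySem.List.slice p.2 (some 6) (some 12)
        match best with
        | none => some (p.1, s)
        | some b => if b.2 < s then some (p.1, s) else some b)
      acc
    = pvBestFold (dicio.map (fun p => (p.1, PySem.List.slice p.2 (some 6) (some 12)))) acc := by
  induction dicio generalizing acc with
  | nil => rfl
  | cons x t ih =>
    simp only [List.foldl_cons, List.map_cons, pvBestFold, List.foldl_cons] at *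
    cases acc with
    | none => exact ih _
    | some b => exact ih _

-- map Prod.snd commutes: B's running best projects onto max()'s running max.
theorem pvMaxFold_eq_snd (ps : List (String × List Int)) (acc : Option (String × List Int)) :
    (ps.map Prod.snd).foldl
      (fun acc x =>
        match acc with
        | none => some x
        | some m => if m < x then some x else some m)
      (acc.map Prod.snd)
    = (pvBestFold ps acc).map Prod.snd := by
  induction ps generalizing acc with
  | nil => rfl
  | cons x t ih =>
    simp only [List.map_cons, List.foldl_cons, pvBestFold, List.foldl_cons] at *
    cases acc with
    | none => exact ih (some x)
    | some b =>
      by_cases h : b.2 < x.2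
      · simp only [Option.map_some, if_pos h]
        exact ih (some x)
      · simp only [Option.map_some, if_neg h]
        exact ih (some b)

-- the accumulator stays `some`
theorem pvBestFold_isSome (ps : List (String × List Int)) (b : String × List Int) :
    ∃ r, pvBestFold ps (some b) = some r := by
  induction ps generalizing b with
  | nil => exact ⟨b, rfl⟩
  | cons x t ih =>
    simp only [pvBestFold, List.foldl_cons]
    by_cases h : b.2 < x.2
    · simpa [h] using ih x
    · simpa [h] using ih b

-- B's result is the FIRST pair attaining the maximal slice: everything before it is strictly smaller.
theorem pvBestFold_acc_split (ps : List (String × List Int)) (b r : String × List Int)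
    (h : pvBestFold ps (some b) = some r) :
    r = b ∨ ∃ pre suf, ps = pre ++ r :: suf ∧ b.2 < r.2 ∧ ∀ x ∈ pre, x.2 < r.2 := by
  induction ps generalizing b with
  | nil =>
    left
    simpa [pvBestFold] using h.symm
  | cons x t ih =>
    simp only [pvBestFold, List.foldl_cons] at h
    by_cases hx : b.2 < x.2
    · rw [if_pos hx] at h
      rcases ih x h with h1 | ⟨pre, suf, hsplit, hlt, hpre⟩
      · right
        exact ⟨[], t, by simp [h1], h1 ▸ hx, by simp⟩
      · right
        refine ⟨x :: pre, suf, by simp [hsplit], lt_trans hx hlt, ?_⟩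
        intro y hy
        rcases List.mem_cons.mp hy with rfl | hy
        · exact hlt
        · exact hpre y hy
    · rw [if_neg hx] at h
      rcases ih b h with h1 | ⟨pre, suf, hsplit, hlt, hpre⟩
      · left; exact h1
      · right
        refine ⟨x :: pre, suf, by simp [hsplit], hlt, ?_⟩
        intro y hy
        rcases List.mem_cons.mp hy with rfl | hy
        · exact lt_of_le_of_lt (not_lt.mp hx) hlt
        · exact hpre y hy

theorem pvBestFold_split (ps : List (String × List Int)) (r : String × List Int)
    (h : pvBestFold ps none = some r) (hne : ps ≠ []) :
    ∃ pre suf, ps = pre ++ r :: suf ∧ ∀ x ∈ pre, x.2 < r.2 := by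
  cases ps with
  | nil => exact absurd rfl hne
  | cons x t =>
    simp only [pvBestFold, List.foldl_cons] at h
    rcases pvBestFold_acc_split t x r h with rfl | ⟨pre, suf, hsplit, hlt, hpre⟩
    · exact ⟨[], t, rfl, by simp⟩
    · refine ⟨x :: pre, suf, by simp [hsplit], ?_⟩
      intro y hy
      rcases List.mem_cons.mp hy with rfl | hy
      · exact hlt
      · exact hpre y hy

-- first occurrence: idxOf? of v in pre ++ v :: suf when pre avoids v
theorem pvIdxOf_append (pre suf : List (List Int)) (v : List Int)
    (hpre : ∀ x ∈ pre, x ≠ v) :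
    List.idxOf? v (pre ++ v :: suf) = some pre.length := by
  induction pre with
  | nil => simp [List.idxOf?_cons]
  | cons a t ih =>
    have ha : a ≠ v := hpre a (by simp)
    simp [List.idxOf?_cons, ha, ih (fun x hx => hpre x (by simp [hx]))]

-- max() with no key is the running-max foldl with the bare match
theorem pvMax?_eq (vs : List (List Int)) :
    PySem.List.max? vs (fun x => x)
    = vs.foldl
        (fun acc x =>
          match acc with
          | none => some x
          | some m => if m < x then some x else some m)
        none := by
  unfold PySem.List.max?
  congr 1
  funext acc x
  cases acc <;> rfl

-- ===== VERDICT (by name: the statement is the Claim_ definition above) =====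
theorem total_do_semestre_por_bairro_spec : Claim_equal_total_do_semestre_por_bairro := by
  unfold Claim_equal_total_do_semestre_por_bairro
  intro dicio _ hpre
  unfold Spec_total_do_semestre_por_bairro total_do_semestre_por_bairro total_do_semestre_por_bairro_alt
  rw [pvBestFold_eq_alt]
  set ps := dicio.map (fun p => (p.1, PySem.List.slice p.2 (some 6) (some 12))) with hps
  have hpsne : ps ≠ [] := by
    simpa [hps] using hpre
  obtain ⟨r, hr⟩ : ∃ r, pvBestFold ps none = some r := by
    cases hq : ps with
    | nil => exact absurd hq hpsne
    | cons x t =>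
      simpa [pvBestFold, List.foldl_cons] using pvBestFold_isSome t x
  obtain ⟨pre, suf, hsplit, hlt⟩ := pvBestFold_split ps r hr hpsne
  -- A's parallel-list fold is the two maps
  have hfold : List.foldl
      (fun st p => (st.1 ++ [PySem.List.slice p.2 (some 6) (some 12)], st.2 ++ [p.1]))
      (([] : List (List Int)), ([] : List String)) dicio
      = (ps.map Prod.snd, ps.map Prod.fst) := by
    have h := PySem.List.foldl_prod_mk
      (fun (s : List (List Int)) (e : String × List Int) => s ++ [PySem.List.slice e.2 (some 6) (some 12)])
      (fun (s : List String) (e : String × List Int) => s ++ [e.1]) dicio [] []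
    simp only [PySem.List.foldl_append_singleton_eq_map, List.nil_append] at h
    rw [h, hps]
    simp [List.map_map, Function.comp]
  rw [hfold]
  have hmax : PySem.List.max? (ps.map Prod.snd) (fun x => x) = some r.2 := by
    have h2 := pvMaxFold_eq_snd ps none
    simp only [Option.map_none] at h2
    rw [pvMax?_eq, h2, hr]
    rfl
  have hidx : PySem.List.index? (ps.map Prod.snd) r.2 = some pre.length := by
    show List.idxOf? r.2 (ps.map Prod.snd) = some pre.length
    rw [hsplit, List.map_append, List.map_cons]
    rw [pvIdxOf_append _ _ _ (by
      intro x hx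
      obtain ⟨y, hy, rfl⟩ := List.mem_map.mp hx
      exact ne_of_lt (hlt y hy))]
    simp
  have hget : PySem.List.pyGet? (ps.map Prod.fst) (pre.length : Int) = some r.1 := by
    rw [hsplit, List.map_append, List.map_cons,
        show (pre.length : Int) = ((pre.map Prod.fst).length : Int) by simp]
    exact PySem.List.pyGet?_append_length _ _ _
  simp only [hmax, hidx, hget, hr, Option.getD_some]
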